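-- pv_equiv track=rewrite | github.com/coding-armadillo/kattis | src/heroesofvelmar.py | calculate
-- ===== SOURCE A (Python) =====
-- m = {
--     "Shadow": 6,
--     "Gale": 5,
--     "Ranger": 4,
--     "Anvil": 7,
--     "Vexia": 3,
--     "Guardian": 8,
--     "Thunderheart": 6,
--     "Frostwhisper": 2,
--     "Voidclaw": 3,
--     "Ironwood": 3,
--     "Zenith": 4,
--     "Seraphina": 1,
-- }
--
-- def calculate(heros, location):
--     boost = 0
--
--     if "Seraphina" in heros:
--         boost += heros.count("Seraphina") * (len(heros) - 1)
--
--     if location == "center":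
--         boost += heros.count("Zenith") * 5
--
--     if len(heros) == 4:
--         boost += m["Thunderheart"] * heros.count("Thunderheart")
--
--     return sum([m[h] for h in heros]) + boost
-- ===== SOURCE B (Python) =====
-- m = {
--     "Shadow": 6,
--     "Gale": 5,
--     "Ranger": 4,
--     "Anvil": 7,
--     "Vexia": 3,
--     "Guardian": 8,
--     "Thunderheart": 6,
--     "Frostwhisper": 2,
--     "Voidclaw": 3,
--     "Ironwood": 3,
--     "Zenith": 4,
--     "Seraphina": 1,
-- }
--
-- def calculate(heros, location):
--     # aggregate into a frequency dict, fold every boost into a per-hero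
--     # effective value, and return the weighted sum over DISTINCT heroes
--     n = len(heros)
--     counts = {}
--     for h in heros:
--         counts[h] = counts.get(h, 0) + 1
--
--     def value(h):
--         v = m[h]
--         if h == "Seraphina":
--             v += n - 1
--         if h == "Zenith" and location == "center":
--             v += 5
--         if h == "Thunderheart" and n == 4:
--             v += m["Thunderheart"]
--         return v
--
--     return sum(cnt * value(h) for h, cnt in counts.items())
-- ===== Notes on version B (the rewrite author's own statement) =====
-- stated objective: alternative
-- what changed: Instead of five passes with membership/count scans and post-loop boost arithmetic, B builds a frequency dictionary of the heroes, folds every boost (Seraphina's n-1, Zenith's center bonus, Thunderheart's 4-hero doubling) into a per-hero effective value, and returns the weighted sum cnt*value(h) over the distinct heroes.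
-- outside the precondition, e.g. on calculate(['Bob'], 'center'): A raises KeyError, B raises KeyError
import Mathlib
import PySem

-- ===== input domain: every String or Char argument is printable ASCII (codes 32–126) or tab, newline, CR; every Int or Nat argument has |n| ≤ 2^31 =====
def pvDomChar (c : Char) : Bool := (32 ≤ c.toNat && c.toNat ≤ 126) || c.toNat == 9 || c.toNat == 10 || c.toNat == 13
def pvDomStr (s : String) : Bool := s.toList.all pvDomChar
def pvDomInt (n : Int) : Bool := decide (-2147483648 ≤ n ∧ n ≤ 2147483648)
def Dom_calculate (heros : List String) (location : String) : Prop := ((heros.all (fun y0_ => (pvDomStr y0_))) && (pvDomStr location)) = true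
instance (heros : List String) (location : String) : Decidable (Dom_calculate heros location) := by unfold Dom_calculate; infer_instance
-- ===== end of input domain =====

-- B builds a frequency dict of the heroes, folds every boost into a per-hero effective
-- value, and returns the weighted sum over the distinct heroes (alternative organization).

-- the module-level dict m
def pyM : PySem.Dict String Int := PySem.Dict.ofList
  [("Shadow", 6), ("Gale", 5), ("Ranger", 4), ("Anvil", 7), ("Vexia", 3), ("Guardian", 8),
   ("Thunderheart", 6), ("Frostwhisper", 2), ("Voidclaw", 3), ("Ironwood", 3),
   ("Zenith", 4), ("Seraphina", 1)]

-- m[h]; exact whenever h is a key of m (Pre_ guarantees it; Python raises KeyError otherwise)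
def mget (h : String) : Int := (PySem.Dict.get? pyM h).getD 0

-- ===== PORT A =====
def calculate (heros : List String) (location : String) : Int :=
  let boost : Int := 0
  let boost := if heros.contains "Seraphina" then
      boost + (heros.count "Seraphina" : Int) * ((heros.length : Int) - 1) else boost
  let boost := if location == "center" then
      boost + (heros.count "Zenith" : Int) * 5 else boost
  let boost := if heros.length == 4 then
      boost + mget "Thunderheart" * (heros.count "Thunderheart" : Int) else boost
  (heros.map mget).sum + boost

-- ===== PORT B =====
-- the inner 'value' helper: per-hero effective value with all boosts folded in
def pvValue (n : Int) (location : String) (h : String) : Int :=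
  let v := mget h
  let v := if h == "Seraphina" then v + (n - 1) else v
  let v := if h == "Zenith" && location == "center" then v + 5 else v
  let v := if h == "Thunderheart" && n == 4 then v + mget "Thunderheart" else v
  v

def calculate_alt (heros : List String) (location : String) : Int :=
  let n : Int := heros.length
  let counts := heros.foldl (fun d h => d.insert h (d.getD h 0 + 1)) PySem.Dict.empty
  (counts.items.map (fun p => p.2 * pvValue n location p.1)).sum

-- ===== PRECONDITION & SPEC =====
-- Pre_ excludes heroes that are not keys of m, on which A (and B) raise KeyError.
def Pre_calculate (heros : List String) (location : String) : Prop :=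
  ∀ h ∈ heros, PySem.Dict.contains pyM h = true

instance (heros : List String) (location : String) : Decidable (Pre_calculate heros location) := by
  unfold Pre_calculate; infer_instance

def pvWitness_calculate : List String × String :=
  (["Seraphina", "Zenith", "Thunderheart", "Shadow"], "center")

def Spec_calculate (heros : List String) (location : String) (out : Int) : Prop := out = calculate_alt heros location
instance (heros : List String) (location : String) (out : Int) : Decidable (Spec_calculate heros location out) := by unfold Spec_calculate; infer_instance

-- ===== CLAIM =====
def Claim_equal_calculate : Prop := ∀ (heros : List String) (location : String), Dom_calculate heros location → Pre_calculate heros location → Spec_calculate heros location (calculate heros location)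

-- ===== LEMMAS AND PROOFS =====

-- weighted sum over a nodup superset of l's elements equals the plain sum over l
theorem indicator_sum (f : String → Int) (x : String) :
    ∀ (s : List String), s.Nodup → x ∈ s →
      (s.map (fun k => if k = x then f k else 0)).sum = f x := by
  intro t
  induction t with
  | nil => intro _ hx'; simp at hx'
  | cons a as ihs =>
    intro hnd' hx'
    rcases List.mem_cons.mp hx' with h1 | h2
    · have hz : (as.map (fun k => if k = x then f k else 0)).sum = 0 := by
        apply List.sum_eq_zero
        intro y hy
        simp only [List.mem_map] at hy
        obtain ⟨k, hk, hky⟩ := hy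
        have hkx : k ≠ x := by
          intro h
          have : a ∈ as := by rw [← h1, ← h]; exact hk
          exact (List.nodup_cons.mp hnd').1 this
        simpa [hkx] using hky.symm
      simp [← h1, hz]
    · have ha : a ≠ x := by
        intro h
        exact (List.nodup_cons.mp hnd').1 (h ▸ h2)
      simp [ha, ihs (List.nodup_cons.mp hnd').2 h2]

theorem weighted_sum_eq (f : String → Int) :
    ∀ (l s : List String), s.Nodup → (∀ x ∈ l, x ∈ s) →
      (s.map (fun k => (l.count k : Int) * f k)).sum = (l.map f).sum := by
  intro l
  induction l with
  | nil => intro s _ _; simp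
  | cons x xs ih =>
    intro s hnd hsub
    have hx : x ∈ s := hsub x (by simp)
    have hsum : (s.map (fun k => ((x :: xs).count k : Int) * f k)).sum =
        (s.map (fun k => (xs.count k : Int) * f k)).sum
        + (s.map (fun k => if k = x then f k else 0)).sum := by
      rw [← List.sum_map_add]
      refine congrArg List.sum (List.map_congr_left (fun k _ => ?_))
      by_cases hk : k = x
      · subst hk; simp [List.count_cons]; push_cast; ring
      · have hk' : x ≠ k := fun h => hk h.symm
        simp [List.count_cons, hk, hk']
    rw [hsum, indicator_sum f x s hnd hx, ih s hnd (fun y hy => hsub y (by simp [hy]))]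
    simp only [List.map_cons, List.sum_cons]
    ring

-- sum of an indicator map is count * constant
theorem sum_indicator (l : List String) (a : String) (c : Int) :
    (l.map (fun h => if h = a then c else 0)).sum = (l.count a : Int) * c := by
  induction l with
  | nil => simp
  | cons x xs ih =>
    by_cases hx : x = a <;> simp [List.count_cons, hx, ih] <;> push_cast <;> ring

-- the per-hero value sums to A's total-plus-boost shape
theorem sum_value (l : List String) (n : Int) (location : String) :
    (l.map (pvValue n location)).sum =
      (l.map mget).sum + (l.count "Seraphina" : Int) * (n - 1)
      + (if location == "center" then (l.count "Zenith" : Int) * 5 else 0)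
      + (if n == 4 then mget "Thunderheart" * (l.count "Thunderheart" : Int) else 0) := by
  have hv : ∀ h, pvValue n location h =
      mget h + (if h = "Seraphina" then n - 1 else 0)
      + (if h = "Zenith" then (if location == "center" then 5 else 0) else 0)
      + (if h = "Thunderheart" then (if n == 4 then mget "Thunderheart" else 0) else 0) := by
    intro h
    unfold pvValue
    by_cases h1 : h = "Seraphina" <;> by_cases h2 : h = "Zenith" <;>
      by_cases h3 : h = "Thunderheart" <;>
      simp_all <;> split_ifs <;> simp_all <;> ring
  calc (l.map (pvValue n location)).sum
      = (l.map (fun h => mget h + (if h = "Seraphina" then n - 1 else 0)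
          + (if h = "Zenith" then (if location == "center" then 5 else 0) else 0)
          + (if h = "Thunderheart" then (if n == 4 then mget "Thunderheart" else 0) else 0))).sum := by
        congr 1; exact List.map_congr_left (fun h _ => hv h)
    _ = (l.map mget).sum
        + (l.map (fun h => if h = "Seraphina" then n - 1 else 0)).sum
        + (l.map (fun h => if h = "Zenith" then (if location == "center" then 5 else 0) else 0)).sum
        + (l.map (fun h => if h = "Thunderheart" then (if n == 4 then mget "Thunderheart" else 0) else 0)).sum := by
        simp [← List.sum_map_add]
    _ = _ := by
        rw [sum_indicator, sum_indicator, sum_indicator]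
        split_ifs <;> push_cast <;> ring

-- ===== VERDICT =====
theorem calculate_spec : Claim_equal_calculate := by
  intro heros location _ _
  unfold Spec_calculate calculate calculate_alt
  rw [PySem.Dict.foldl_insert_getD_add_one_eq_counter]
  dsimp only
  rw [PySem.Dict.items_counter]
  simp only [List.map_map]
  have : ((PySem.Set.ofList heros).map
      ((fun p : String × Int => p.2 * pvValue (heros.length : Int) location p.1) ∘
        fun k => (k, (heros.count k : Int)))).sum
      = (heros.map (pvValue (heros.length : Int) location)).sum := by
    exact weighted_sum_eq _ heros (PySem.Set.ofList heros)
      (PySem.Set.nodup_ofList heros) (fun x hx => (PySem.Set.mem_ofList heros x).mpr hx)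
  rw [this, sum_value]
  have h4 : (((heros.length : Int)) == (4 : Int)) = (heros.length == 4) := by
    by_cases h : heros.length = 4 <;> simp [h] <;> omega
  rw [h4]
  by_cases hs : heros.contains "Seraphina"
  · simp only [hs, if_true]
    split_ifs <;> push_cast <;> ring
  · have hc : heros.count "Seraphina" = 0 := by
      simp [List.count_eq_zero] at hs ⊢; exact hs
    simp only [hs, hc]
    split_ifs <;> push_cast <;> ring_nf
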